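-- pv_equiv track=rewrite | github.com/rickyegl/Final-Project | src/baldi_teacher/gui_view.py | _split_math_segments
-- ===== SOURCE A (Python) =====
-- def _split_math_segments(text: str) -> list[tuple[bool, str]]:
--     """Split text into math and non-math segments."""
--     segments: list[tuple[bool, str]] = []
--     buffer: list[str] = []
--     i = 0
--     length = len(text)
--
--     while i < length:
--         # Check for $$...$$
--         if text.startswith("$$", i):
--             end = text.find("$$", i + 2)
--             if end != -1:
--                 if buffer:
--                     segments.append((False, "".join(buffer)))
--                     buffer.clear()
--                 segments.append((True, text[i + 2:end]))
--                 i = end + 2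
--                 continue
--
--         # --- THIS IS THE FIX ---
--         # Added check for \( ... \) delimiters
--         # Check for \(...\)
--         if text.startswith("\\(", i):
--             end = text.find("\\)", i + 2)
--             if end != -1:
--                 if buffer:
--                     segments.append((False, "".join(buffer)))
--                     buffer.clear()
--                 segments.append((True, text[i + 2:end]))
--                 i = end + 2
--                 continue
--         # --- END OF FIX ---
--
--         # Check for $...$
--         if text[i] == "$":
--             end = text.find("$", i + 1)
--             if end != -1:
--                 if buffer:
--                     segments.append((False, "".join(buffer)))
--                     buffer.clear()
--                 segments.append((True, text[i + 1:end]))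
--                 i = end + 1
--                 continue
--
--         buffer.append(text[i])
--         i += 1
--
--     if buffer:
--         segments.append((False, "".join(buffer)))
--
--     return segments
-- ===== SOURCE B (Python) =====
-- import re
--
-- _MATH_RE = re.compile(r'\$\$(.*?)\$\$|\\\((.*?)\\\)|\$(.*?)\$', re.DOTALL)
--
--
-- def _split_math_segments(text: str) -> list[tuple[bool, str]]:
--     """Split text into math and non-math segments (regex-based)."""
--     segments: list[tuple[bool, str]] = []
--     last = 0
--     for m in _MATH_RE.finditer(text):
--         if m.start() > last:
--             segments.append((False, text[last:m.start()]))
--         g1, g2, g3 = m.group(1), m.group(2), m.group(3)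
--         segments.append((True, g1 if g1 is not None else g2 if g2 is not None else g3))
--         last = m.end()
--     if last < len(text):
--         segments.append((False, text[last:]))
--     return segments
-- ===== Notes on version B (the rewrite author's own statement) =====
-- stated objective: idiomatic
-- what changed: Replaced A's char-by-char while-loop with a buffer accumulator by a single compiled regex (ordered alternation of the three delimiter forms, non-greedy groups, DOTALL) iterated with finditer plus a last-end cursor that emits non-empty gap slices directly.
import Mathlib
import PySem

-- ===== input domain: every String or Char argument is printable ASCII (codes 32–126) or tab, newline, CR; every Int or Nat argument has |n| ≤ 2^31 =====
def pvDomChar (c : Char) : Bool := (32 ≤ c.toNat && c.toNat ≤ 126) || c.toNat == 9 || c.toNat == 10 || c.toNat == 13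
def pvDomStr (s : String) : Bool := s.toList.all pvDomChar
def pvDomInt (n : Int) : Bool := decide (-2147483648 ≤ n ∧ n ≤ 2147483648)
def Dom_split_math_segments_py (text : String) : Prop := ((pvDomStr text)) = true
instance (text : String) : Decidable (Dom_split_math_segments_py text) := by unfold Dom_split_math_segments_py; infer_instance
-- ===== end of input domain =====

-- B replaces A's char-by-char buffering loop with a regex-style scanner that finds the
-- earliest delimited match and emits the gap slice directly (idiomatic; same cost).

-- Shared delimiter predicates (the three alternatives, in A's check order / B's regex
-- alternation order). `findSub pat cs` = Python str.find of nonempty pat, exact: first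
-- index where pat is a prefix of the remaining suffix, none = -1.
def findSub (pat : List Char) : List Char → Option Nat
  | [] => if pat.isPrefixOf ([] : List Char) then some 0 else none
  | c :: rest =>
    if pat.isPrefixOf (c :: rest) then some 0
    else (findSub pat rest).map (· + 1)

-- "$$...$$": startswith "$$" and a closing "$$" is found after it
def alt1? (cs : List Char) : Option (String × List Char) :=
  if ['$', '$'].isPrefixOf cs then
    match findSub ['$', '$'] (cs.drop 2) with
    | some k => some (String.mk ((cs.drop 2).take k), cs.drop (k + 4))
    | none => none
  else none

-- "\(...\)"
def alt2? (cs : List Char) : Option (String × List Char) :=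
  if ['\\', '('].isPrefixOf cs then
    match findSub ['\\', ')'] (cs.drop 2) with
    | some k => some (String.mk ((cs.drop 2).take k), cs.drop (k + 4))
    | none => none
  else none

-- "$...$"
def alt3? (cs : List Char) : Option (String × List Char) :=
  match cs with
  | '$' :: t =>
    (match findSub ['$'] t with
     | some k => some (String.mk (t.take k), t.drop (k + 1))
     | none => none)
  | _ => none

-- length lemmas needed by the ports' termination (cited by decreasing_by)
theorem alt1_len {cs : List Char} {s : String} {r : List Char}
    (h : alt1? cs = some (s, r)) : r.length < cs.length := by
  unfold alt1? at h
  split at h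
  · rename_i hp
    have h2 : 2 ≤ cs.length := by
      have := List.isPrefixOf_iff_prefix.mp hp
      simpa using this.length_le
    split at h
    · cases h; simp; omega
    · exact absurd h (by simp)
  · exact absurd h (by simp)

theorem alt2_len {cs : List Char} {s : String} {r : List Char}
    (h : alt2? cs = some (s, r)) : r.length < cs.length := by
  unfold alt2? at h
  split at h
  · rename_i hp
    have h2 : 2 ≤ cs.length := by
      have := List.isPrefixOf_iff_prefix.mp hp
      simpa using this.length_le
    split at h
    · cases h; simp; omega
    · exact absurd h (by simp)
  · exact absurd h (by simp)

theorem alt3_len {cs : List Char} {s : String} {r : List Char}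
    (h : alt3? cs = some (s, r)) : r.length < cs.length := by
  unfold alt3? at h
  split at h
  · split at h
    · cases h; simp
    · exact absurd h (by simp)
  · exact absurd h (by simp)

-- ===== PORT A =====
-- A's while-loop, transliterated: the suffix text[i:] is the list argument, `buffer`
-- accumulates non-math chars, `segments` is the output accumulator; the three delimiter
-- checks are tried in A's order, with fall-through to buffering one char.
def aLoop : List Char → List Char → List (Bool × String) → List (Bool × String)
  | [], buffer, segments =>
    if buffer.isEmpty then segments else segments ++ [(false, String.mk buffer)]
  | c :: t, buffer, segments =>
    match h1 : alt1? (c :: t) with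
    | some (content, rest) =>
      aLoop rest []
        ((if buffer.isEmpty then segments else segments ++ [(false, String.mk buffer)]) ++ [(true, content)])
    | none =>
      match h2 : alt2? (c :: t) with
      | some (content, rest) =>
        aLoop rest []
          ((if buffer.isEmpty then segments else segments ++ [(false, String.mk buffer)]) ++ [(true, content)])
      | none =>
        match h3 : alt3? (c :: t) with
        | some (content, rest) =>
          aLoop rest []
            ((if buffer.isEmpty then segments else segments ++ [(false, String.mk buffer)]) ++ [(true, content)])
        | none => aLoop t (buffer ++ [c]) segments
termination_by cs _ _ => cs.length
decreasing_by
  · exact alt1_len h1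
  · exact alt2_len h2
  · exact alt3_len h3
  · simp

def split_math_segments_py (text : String) : List (Bool × String) :=
  aLoop text.toList [] []

-- ===== PORT B =====
-- Source B's regex scanner, ported by hand (no regex library in Lean), exact for this
-- pattern: `matchAt` is one attempt of the ordered alternation at a position
-- (non-greedy groups = nearest close = findSub); `findMatchIdx` is finditer's scan for
-- the leftmost match, returning its start index, group content and the rest after it.
def matchAt (cs : List Char) : Option (String × List Char) :=
  match alt1? cs with
  | some r => some r
  | none =>
    match alt2? cs with
    | some r => some r
    | none => alt3? cs

def findMatchIdx : List Char → Option (Nat × String × List Char)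
  | [] =>
    (match matchAt [] with
     | some (content, rest) => some (0, content, rest)
     | none => none)
  | c :: t =>
    match matchAt (c :: t) with
    | some (content, rest) => some (0, content, rest)
    | none => (findMatchIdx t).map (fun p => (p.1 + 1, p.2))

theorem matchAt_len {cs : List Char} {s : String} {r : List Char}
    (h : matchAt cs = some (s, r)) : r.length < cs.length := by
  unfold matchAt at h
  split at h
  · rename_i heq; cases h; exact alt1_len heq
  · split at h
    · rename_i heq; cases h; exact alt2_len heq
    · exact alt3_len h

theorem findMatchIdx_len {cs : List Char} {j : Nat} {s : String} {r : List Char}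
    (h : findMatchIdx cs = some (j, s, r)) : r.length < cs.length ∧ j < cs.length := by
  induction cs generalizing j with
  | nil =>
    unfold findMatchIdx at h
    split at h
    · rename_i heq; exact absurd (matchAt_len heq) (by simp)
    · exact absurd h (by simp)
  | cons c t ih =>
    unfold findMatchIdx at h
    split at h
    · rename_i heq; cases h; exact ⟨matchAt_len heq, by simp⟩
    · rcases Option.map_eq_some_iff.mp h with ⟨⟨j', s', r'⟩, hfi, hv⟩
      cases hv
      have := ih hfi
      constructor <;> simp <;> omega

-- the gap before the match is emitted only when non-empty (m.start() > last), then the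
-- math group, then recurse after the match; trailing gap handled by the `none` case.
def bLoop (cs : List Char) : List (Bool × String) :=
  match h : findMatchIdx cs with
  | none => if cs.isEmpty then [] else [(false, String.mk cs)]
  | some (j, content, rest) =>
    (if j == 0 then [] else [(false, String.mk (cs.take j))]) ++ (true, content) :: bLoop rest
termination_by cs.length
decreasing_by exact (findMatchIdx_len h).1

def split_math_segments_py_alt (text : String) : List (Bool × String) :=
  bLoop text.toList

-- ===== PRECONDITION & SPEC =====
def Spec_split_math_segments_py (text : String) (out : List (Bool × String)) : Prop := out = split_math_segments_py_alt text
instance (text : String) (out : List (Bool × String)) : Decidable (Spec_split_math_segments_py text out) := by unfold Spec_split_math_segments_py; infer_instance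

-- ===== CLAIM (what is proved, stated in full; the proofs are below) =====
def Claim_equal_split_math_segments_py : Prop := ∀ (text : String), Dom_split_math_segments_py text → Spec_split_math_segments_py text (split_math_segments_py text)

-- ===== LEMMAS AND PROOFS =====

-- `glue buffer cs`: what B produces on cs with A's pending buffer prepended to the next gap
def glue (buffer cs : List Char) : List (Bool × String) :=
  match findMatchIdx cs with
  | none =>
    if (buffer ++ cs).isEmpty then [] else [(false, String.mk (buffer ++ cs))]
  | some (j, content, rest) =>
    (if (buffer ++ cs.take j).isEmpty then [] else [(false, String.mk (buffer ++ cs.take j))])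
      ++ (true, content) :: bLoop rest

theorem bLoop_eq_glue (cs : List Char) : bLoop cs = glue [] cs := by
  rw [bLoop, glue]
  rcases h : findMatchIdx cs with _ | ⟨j, content, rest⟩
  · simp
  · have hj := (findMatchIdx_len h).2
    have hne : cs ≠ [] := by intro hc; subst hc; simp at hj
    by_cases hj0 : j = 0
    · subst hj0; simp
    · have : cs.take j ≠ [] := by
        simp [List.take_eq_nil_iff]
        exact ⟨hj0, hne⟩
      simp [hj0, this]

theorem matchAt_none_findMatchIdx {c : Char} {t : List Char}
    (h : matchAt (c :: t) = none) :
    findMatchIdx (c :: t) = (findMatchIdx t).map (fun p => (p.1 + 1, p.2)) := by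
  conv_lhs => rw [findMatchIdx, h]

theorem matchAt_some_findMatchIdx {cs : List Char} {content : String} {rest : List Char}
    (h : matchAt cs = some (content, rest)) :
    findMatchIdx cs = some (0, content, rest) := by
  cases cs <;> (conv_lhs => rw [findMatchIdx, h])

theorem glue_shift (buffer : List Char) (c : Char) (t : List Char)
    (h : matchAt (c :: t) = none) :
    glue buffer (c :: t) = glue (buffer ++ [c]) t := by
  rw [glue, glue, matchAt_none_findMatchIdx h]
  rcases ht : findMatchIdx t with _ | ⟨j, content, rest⟩
  · simp
  · simp [List.take_succ_cons, List.append_assoc]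

theorem aLoop_eq_glue : ∀ (n : Nat) (cs : List Char), cs.length ≤ n →
    ∀ buffer segments, aLoop cs buffer segments = segments ++ glue buffer cs := by
  intro n
  induction n with
  | zero =>
    intro cs hlen buffer segments
    have : cs = [] := List.length_eq_zero_iff.mp (Nat.le_zero.mp hlen)
    subst this
    rw [aLoop, glue]
    have : findMatchIdx [] = none := by decide
    rw [this]
    by_cases hb : buffer.isEmpty <;> simp [hb]
  | succ n ih =>
    intro cs hlen buffer segments
    match cs with
    | [] =>
      rw [aLoop, glue]
      have : findMatchIdx [] = none := by decide
      rw [this]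
      by_cases hb : buffer.isEmpty <;> simp [hb]
    | c :: t =>
      have hlen' : t.length ≤ n := by simp at hlen; omega
      rw [aLoop]
      split
      · rename_i content rest h1
        have hm : matchAt (c :: t) = some (content, rest) := by
          unfold matchAt; rw [h1]
        have hr : rest.length ≤ n := by
          have := matchAt_len hm; simp at this; omega
        rw [ih rest hr [] _, ← bLoop_eq_glue]
        conv_rhs => rw [glue, matchAt_some_findMatchIdx hm]
        by_cases hb : buffer.isEmpty <;> simp [hb]
      · rename_i h1
        split
        · rename_i content rest h2
          have hm : matchAt (c :: t) = some (content, rest) := by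
            unfold matchAt; rw [h1, h2]
          have hr : rest.length ≤ n := by
            have := matchAt_len hm; simp at this; omega
          rw [ih rest hr [] _, ← bLoop_eq_glue]
          conv_rhs => rw [glue, matchAt_some_findMatchIdx hm]
          by_cases hb : buffer.isEmpty <;> simp [hb]
        · rename_i h2
          split
          · rename_i content rest h3
            have hm : matchAt (c :: t) = some (content, rest) := by
              unfold matchAt; rw [h1, h2, h3]
            have hr : rest.length ≤ n := by
              have := matchAt_len hm; simp at this; omega
            rw [ih rest hr [] _, ← bLoop_eq_glue]
            conv_rhs => rw [glue, matchAt_some_findMatchIdx hm]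
            by_cases hb : buffer.isEmpty <;> simp [hb]
          · rename_i h3
            have hm : matchAt (c :: t) = none := by
              unfold matchAt; rw [h1, h2, h3]
            rw [ih t hlen' (buffer ++ [c]) segments, glue_shift buffer c t hm]

-- ===== VERDICT (by name: the statement is the Claim_ definition above) =====
theorem split_math_segments_py_spec : Claim_equal_split_math_segments_py := by
  intro text _
  unfold Spec_split_math_segments_py split_math_segments_py split_math_segments_py_alt
  rw [aLoop_eq_glue text.toList.length text.toList le_rfl [] [], bLoop_eq_glue]
  simp
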